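-- pv_equiv track=rewrite | github.com/MForofontov/python_utils | pyutils_collection/bioinformatics_functions/sequence_operations/sequence_to_kmers.py | sequence_to_kmers
-- ===== SOURCE A (Python) =====
-- def sequence_to_kmers(seq: str, k: int) -> list[str]:
--     """
--     Split a sequence into k-mers of length k.
--
--     Parameters
--     ----------
--     seq : str
--         Input sequence.
--     k : int
--         Length of each k-mer.
--
--     Returns
--     -------
--     List[str]
--         List of k-mers.
--
--     Raises
--     ------
--     TypeError
--         If seq is not a string or k is not an integer.
--     ValueError
--         If k is not positive or longer than sequence.
--
--     Examples
--     --------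
--     >>> sequence_to_kmers('ATGCGA', 3)
--     ['ATG', 'TGC', 'GCG', 'CGA']
--     """
--     if not isinstance(seq, str):
--         raise TypeError(f"seq must be str, got {type(seq).__name__}")
--     if not isinstance(k, int):
--         raise TypeError(f"k must be int, got {type(k).__name__}")
--     if k <= 0:
--         raise ValueError("k must be positive")
--     if k > len(seq):
--         raise ValueError("k cannot be longer than sequence")
--     return [seq[i : i + k] for i in range(len(seq) - k + 1)]
-- ===== SOURCE B (Python) =====
-- def sequence_to_kmers(seq: str, k: int) -> list[str]:
--     if not isinstance(seq, str):
--         raise TypeError(f"seq must be str, got {type(seq).__name__}")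
--     if not isinstance(k, int):
--         raise TypeError(f"k must be int, got {type(k).__name__}")
--     if k <= 0:
--         raise ValueError("k must be positive")
--     if k > len(seq):
--         raise ValueError("k cannot be longer than sequence")
--     return [''.join(t) for t in zip(*(seq[j:] for j in range(k)))]
-- ===== Notes on version B (the rewrite author's own statement) =====
-- stated objective: idiomatic
-- what changed: Replaces per-window slicing (seq[i:i+k] for each start i) with the zip-transpose sliding-window idiom: the k shifted views seq[j:] are zipped column-wise and each tuple joined, so windows emerge by transposition; it trades speed for idiom when k is large, since materialising the k shifted slices costs Theta(n*k) even when few windows exist.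
import Mathlib
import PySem

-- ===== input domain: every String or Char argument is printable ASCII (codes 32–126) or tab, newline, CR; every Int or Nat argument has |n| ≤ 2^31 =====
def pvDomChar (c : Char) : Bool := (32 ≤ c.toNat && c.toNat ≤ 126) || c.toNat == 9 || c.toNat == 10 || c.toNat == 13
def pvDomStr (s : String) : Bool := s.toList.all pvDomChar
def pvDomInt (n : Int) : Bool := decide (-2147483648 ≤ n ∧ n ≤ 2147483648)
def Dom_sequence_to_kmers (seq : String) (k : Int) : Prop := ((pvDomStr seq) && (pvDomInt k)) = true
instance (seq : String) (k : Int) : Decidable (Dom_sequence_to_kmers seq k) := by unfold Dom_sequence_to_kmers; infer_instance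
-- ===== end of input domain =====

-- B re-implements the window list with the zip-transpose idiom (k shifted slices zipped column-wise)
-- instead of slicing each window seq[i:i+k]; same output, objective: idiomatic decomposition.
-- Both Pythons raise outside Pre_ (k ≤ 0 or k > len(seq)); those inputs are excluded.

-- ===== PORT A =====
-- return [seq[i : i + k] for i in range(len(seq) - k + 1)]
def sequence_to_kmers (seq : String) (k : Int) : List String :=
  (PySem.List.pyRange 0 ((seq.toList.length : Int) - k + 1) 1).map
    (fun i => String.ofList (PySem.List.slice seq.toList (some i) (some (i + k))))

-- ===== PORT B =====
-- termination helpers for pvZipStar (cited by its decreasing_by)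
theorem pv_sum_tail_le (rows : List (List Char)) :
    ((rows.map List.tail).map List.length).sum ≤ (rows.map List.length).sum := by
  induction rows with
  | nil => simp
  | cons r rs ih =>
      simp only [List.map_cons, List.sum_cons]
      refine Nat.add_le_add ?_ ih
      rw [List.length_tail]; omega

theorem pv_sum_tail_lt (rows : List (List Char)) (h1 : rows ≠ [])
    (h2 : rows.all (fun r => !r.isEmpty) = true) :
    ((rows.map List.tail).map List.length).sum < (rows.map List.length).sum := by
  cases rows with
  | nil => exact absurd rfl h1
  | cons r rs =>
      simp only [List.all_cons, Bool.and_eq_true, Bool.not_eq_true'] at h2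
      have hr : r ≠ [] := by
        intro h; subst h; simp at h2
      simp only [List.map_cons, List.sum_cons]
      have : r.tail.length < r.length := by
        cases r with
        | nil => exact absurd rfl hr
        | cons a as => simp
      exact Nat.add_lt_add_of_lt_of_le this (pv_sum_tail_le rs)

-- Python's zip(*rows) over character rows (stops at the shortest row)
def pvZipStar (rows : List (List Char)) : List (List Char) :=
  if _h : rows ≠ [] ∧ rows.all (fun r => !r.isEmpty) = true then
    (rows.map (fun r => r.headD ' ')) :: pvZipStar (rows.map List.tail)
  else []
termination_by (rows.map List.length).sum
decreasing_by simpa using pv_sum_tail_lt rows _h.1 _h.2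

-- return [''.join(t) for t in zip(*(seq[j:] for j in range(k)))]
def sequence_to_kmers_alt (seq : String) (k : Int) : List String :=
  (pvZipStar ((PySem.List.pyRange 0 k 1).map
    (fun j => PySem.List.slice seq.toList (some j) none))).map (fun t => String.ofList t)

-- ===== PRECONDITION & SPEC =====
-- A (and B) raise ValueError when k ≤ 0 or k > len(seq); exactly those inputs are excluded.
def Pre_sequence_to_kmers (seq : String) (k : Int) : Prop :=
  0 < k ∧ k ≤ (seq.toList.length : Int)
instance (seq : String) (k : Int) : Decidable (Pre_sequence_to_kmers seq k) := by
  unfold Pre_sequence_to_kmers; infer_instance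

def pvWitness_sequence_to_kmers : String × Int := ("ATGCGA", 3)

def Spec_sequence_to_kmers (seq : String) (k : Int) (out : List String) : Prop := out = sequence_to_kmers_alt seq k
instance (seq : String) (k : Int) (out : List String) : Decidable (Spec_sequence_to_kmers seq k out) := by unfold Spec_sequence_to_kmers; infer_instance

-- ===== CLAIM (what is proved, stated in full; the proofs are below) =====
def Claim_equal_sequence_to_kmers : Prop := ∀ (seq : String) (k : Int), Dom_sequence_to_kmers seq k → Pre_sequence_to_kmers seq k → Spec_sequence_to_kmers seq k (sequence_to_kmers seq k)

-- ===== LEMMAS AND PROOFS =====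

-- heads of the shifted rows form the first window
theorem pv_heads_eq_take (l : List Char) (kn : Nat) (hk : kn ≤ l.length) :
    (List.range kn).map (fun j => (l.drop j).headD ' ') = l.take kn := by
  apply List.ext_getElem
  · simp [hk]
  · intro i h1 h2
    simp only [List.getElem_map, List.getElem_range, List.getElem_take]
    have hi : i < l.length := by simp [hk] at h2; omega
    simp [List.head?_drop, List.getElem?_eq_getElem hi]

-- the zip of the kn shifted suffixes is the list of windows
theorem pv_zipStar_eq (kn : Nat) (hk : 1 ≤ kn) (l : List Char) :
    pvZipStar ((List.range kn).map (fun j => l.drop j)) =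
      (List.range (l.length + 1 - kn)).map (fun i => (l.drop i).take kn) := by
  induction l with
  | nil =>
      rw [pvZipStar.eq_def]
      have h0 : (0 : Nat) < kn := hk
      have hmem : ([] : List Char) ∈ (List.range kn).map (fun j => ([] : List Char).drop j) := by
        simp; omega
      have : ¬ (((List.range kn).map (fun j => ([] : List Char).drop j)).all
          (fun r => !r.isEmpty) = true) := by
        intro hall
        have := List.all_eq_true.mp hall _ hmem
        simp at this
      simp only [this]
      have : 0 + 1 - kn = 0 := by omega
      simp [this]
  | cons c t ih =>
      by_cases hle : kn ≤ t.length + 1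
      · -- all rows nonempty: unfold one step
        rw [pvZipStar.eq_def]
        have hne : (List.range kn).map (fun j => (c :: t).drop j) ≠ [] := by
          simp; omega
        have hall : ((List.range kn).map (fun j => (c :: t).drop j)).all
            (fun r => !r.isEmpty) = true := by
          apply List.all_eq_true.mpr
          intro r hr
          simp only [List.mem_map, List.mem_range] at hr
          obtain ⟨j, hj, rfl⟩ := hr
          have : j < (c :: t).length := by simp; omega
          simp only [Bool.not_eq_true', List.isEmpty_eq_false_iff]
          intro habs
          have := congrArg List.length habs
          simp at this; omega
        simp only [hne, hall, and_true, ne_eq, not_false_eq_true, dite_true]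
        have htails : ((List.range kn).map (fun j => (c :: t).drop j)).map List.tail
            = (List.range kn).map (fun j => t.drop j) := by
          simp only [List.map_map]
          apply List.map_congr_left
          intro j _
          simp [List.tail_drop]
        have hheads : ((List.range kn).map (fun j => (c :: t).drop j)).map
            (fun r => r.headD ' ') = (c :: t).take kn := by
          simp only [List.map_map]
          exact pv_heads_eq_take (c :: t) kn (by simp; omega)
        rw [htails, hheads, ih]
        have hsucc : (c :: t).length + 1 - kn = (t.length + 1 - kn) + 1 := by
          simp only [List.length_cons]; omega
        rw [hsucc, List.range_succ_eq_map, List.map_cons, List.map_map]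
        simp [Function.comp_def, List.drop_succ_cons]
      · -- kn > length: some shifted row is empty, zip yields []
        rw [pvZipStar.eq_def]
        have hmem : ((c :: t).drop (kn - 1)) ∈
            (List.range kn).map (fun j => (c :: t).drop j) := by
          simp only [List.mem_map, List.mem_range]
          exact ⟨kn - 1, by omega, rfl⟩
        have hempty : (c :: t).drop (kn - 1) = [] := by
          apply List.drop_eq_nil_of_le
          simp; omega
        have : ¬ (((List.range kn).map (fun j => (c :: t).drop j)).all
            (fun r => !r.isEmpty) = true) := by
          intro hall
          have := List.all_eq_true.mp hall _ hmem
          rw [hempty] at this; simp at this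
        simp only [this]
        have hz : (c :: t).length + 1 - kn = 0 := by
          simp only [List.length_cons]; omega
        rw [hz]
        simp

-- ===== VERDICT (by name: the statement is the Claim_ definition above) =====
theorem sequence_to_kmers_spec : Claim_equal_sequence_to_kmers := by
  intro seq k _ hpre
  obtain ⟨hk0, hkle⟩ := hpre
  unfold Spec_sequence_to_kmers sequence_to_kmers sequence_to_kmers_alt
  set l := seq.toList with hl
  obtain ⟨kn, rfl⟩ : ∃ kn : Nat, k = (kn : Int) := ⟨k.toNat, (Int.toNat_of_nonneg (by omega)).symm⟩
  have hk1 : 1 ≤ kn := by exact_mod_cast hk0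
  have hkn : kn ≤ l.length := by exact_mod_cast hkle
  -- A side: pyRange over Int becomes List.range, slices become drop/take windows
  have hcast : (l.length : Int) - (kn : Int) + 1 = ((l.length - kn + 1 : Nat) : Int) := by
    push_cast [Nat.sub_add_cancel]; omega
  rw [hcast, PySem.List.pyRange_zero_natCast, List.map_map]
  -- B side: shifts are the kn shifted suffixes
  rw [PySem.List.pyRange_zero_natCast, List.map_map]
  have hshift : (List.range kn).map ((fun j => PySem.List.slice l (some j) none) ∘ Nat.cast)
      = (List.range kn).map (fun j => l.drop j) := by
    apply List.map_congr_left
    intro j _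
    simp [Function.comp, PySem.List.slice_from_natCast]
  rw [hshift, pv_zipStar_eq kn hk1 l]
  rw [List.map_map]
  have hlen : l.length + 1 - kn = l.length - kn + 1 := by omega
  rw [hlen]
  apply List.map_congr_left
  intro i _
  simp [Function.comp, PySem.List.slice_natCast_add]
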